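-- pv_equiv track=rewrite | github.com/Alexamk/decRiPPter | lib/COG.py | get_groups_per_genome
-- ===== SOURCE A (Python) =====
-- def get_groups_per_genome(all_groups,genomes):
--     groups_per_genome = {}
--     for genome in genomes:
--         groups_per_genome[genome] = []
--         for counter in all_groups:
--             group = all_groups[counter]
--             if genome in group:
--                 groups_per_genome[genome].append(counter)
--     return groups_per_genome
-- ===== SOURCE B (Python) =====
-- def get_groups_per_genome(all_groups, genomes):
--     # One pass over the groups: scatter each counter to its member genomes' lists.
--     res = {genome: [] for genome in genomes}
--     for counter, group in all_groups.items():
--         for genome in dict.fromkeys(group):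
--             if genome in res:
--                 res[genome].append(counter)
--     return res
-- ===== Notes on version B (the rewrite author's own statement) =====
-- stated objective: faster
-- what changed: Instead of scanning every group once per genome (membership test per (genome,group) pair), B makes a single pass over the groups and scatters each counter to the result lists of the genomes it contains, guarded by one dict lookup.
import Mathlib
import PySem

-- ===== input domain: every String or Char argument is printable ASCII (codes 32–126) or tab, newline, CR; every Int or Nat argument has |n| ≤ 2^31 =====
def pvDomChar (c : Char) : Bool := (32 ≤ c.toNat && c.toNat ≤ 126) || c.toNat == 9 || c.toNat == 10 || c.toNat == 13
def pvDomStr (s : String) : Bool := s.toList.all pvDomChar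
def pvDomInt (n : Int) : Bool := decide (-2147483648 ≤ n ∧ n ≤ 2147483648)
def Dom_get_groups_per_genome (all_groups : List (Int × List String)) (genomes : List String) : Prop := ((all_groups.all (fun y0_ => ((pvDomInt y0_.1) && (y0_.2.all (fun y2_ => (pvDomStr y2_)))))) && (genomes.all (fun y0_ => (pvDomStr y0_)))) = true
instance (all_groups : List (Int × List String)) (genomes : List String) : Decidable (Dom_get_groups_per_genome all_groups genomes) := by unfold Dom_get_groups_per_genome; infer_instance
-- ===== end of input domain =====

-- B replaces A's genome-major double scan (a membership test of each genome in every group) by a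
-- single group-major pass that scatters each counter to its member genomes' lists (objective: faster).

-- ===== PORT A =====
-- 'for counter in all_groups' iterates the dict's keys; 'all_groups[counter]' is a lookup, which for
-- a key taken from the dict itself always succeeds, so getD with an unreachable default is exact.
def get_groups_per_genome (all_groups : List (Int × List String)) (genomes : List String) : List (String × List Int) :=
  (genomes.foldl (fun d genome =>
      all_groups.foldl (fun d p =>
          let group := (PySem.Dict.mk all_groups).getD p.1 []
          if genome ∈ group then d.modify genome [] (· ++ [p.1]) else d)
        (d.insert genome ([] : List Int)))
    (PySem.Dict.empty : PySem.Dict String (List Int))).items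

-- ===== PORT B =====
def get_groups_per_genome_alt (all_groups : List (Int × List String)) (genomes : List String) : List (String × List Int) :=
  let res := genomes.foldl (fun d genome => d.insert genome ([] : List Int))
    (PySem.Dict.empty : PySem.Dict String (List Int))
  (all_groups.foldl (fun d p =>
      (PySem.List.dedup p.2).foldl (fun d genome =>
          if d.contains genome then d.modify genome [] (· ++ [p.1]) else d) d)
    res).items

-- ===== PRECONDITION & SPEC =====
-- all_groups models a Python dict[int, list[str]], whose keys are necessarily distinct; Pre_ states
-- exactly that (an association list with duplicate keys corresponds to no Python input of A).
def Pre_get_groups_per_genome (all_groups : List (Int × List String)) (genomes : List String) : Prop :=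
  (all_groups.map Prod.fst).Nodup
instance (all_groups : List (Int × List String)) (genomes : List String) : Decidable (Pre_get_groups_per_genome all_groups genomes) := by unfold Pre_get_groups_per_genome; infer_instance
def pvWitness_get_groups_per_genome : (List (Int × List String)) × List String :=
  ([(1, ["a", "b"]), (2, ["b"])], ["a", "b", "c"])

def Spec_get_groups_per_genome (all_groups : List (Int × List String)) (genomes : List String) (out : List (String × List Int)) : Prop := out = get_groups_per_genome_alt all_groups genomes
instance (all_groups : List (Int × List String)) (genomes : List String) (out : List (String × List Int)) : Decidable (Spec_get_groups_per_genome all_groups genomes out) := by unfold Spec_get_groups_per_genome; infer_instance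

-- ===== CLAIM (what is proved, stated in full; the proofs are below) =====
def Claim_equal_get_groups_per_genome : Prop := ∀ (all_groups : List (Int × List String)) (genomes : List String), Dom_get_groups_per_genome all_groups genomes → Pre_get_groups_per_genome all_groups genomes → Spec_get_groups_per_genome all_groups genomes (get_groups_per_genome all_groups genomes)

-- ===== LEMMAS AND PROOFS =====

-- the list of counters whose group contains g, in all_groups order: the value both programs compute
def pvVal (all_groups : List (Int × List String)) (g : String) : List Int :=
  (all_groups.filter (fun p => decide (g ∈ p.2))).map Prod.fst

-- A's inner loop over the groups, started right after 'groups_per_genome[genome] = []',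
-- only ever rewrites the value at key g (f abstracts the dict lookup of the group).
lemma pv_A_inner (f : Int × List String → List String) (g : String) (l : List (Int × List String))
    (d : PySem.Dict String (List Int)) (acc : List Int) :
    l.foldl (fun d p => if g ∈ f p then d.modify g [] (· ++ [p.1]) else d) (d.insert g acc)
      = d.insert g (acc ++ (l.filter (fun p => decide (g ∈ f p))).map Prod.fst) := by
  induction l generalizing acc with
  | nil => simp
  | cons p t ih =>
    rw [List.foldl_cons]
    by_cases h : g ∈ f p
    · rw [if_pos h]
      have hstep : (d.insert g acc).modify g [] (· ++ [p.1]) = d.insert g (acc ++ [p.1]) := by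
        rw [PySem.Dict.modify, PySem.Dict.getD_insert_self, PySem.Dict.insert_insert_self]
      rw [hstep, ih (acc ++ [p.1])]
      simp [h]
    · rw [if_neg h, ih acc]
      simp [h]

-- B's scatter loop over one (deduplicated) group keeps the key list unchanged
lemma pv_B_inner_keys (c : Int) (ll : List String) (d : PySem.Dict String (List Int)) :
    (ll.foldl (fun d genome => if d.contains genome then d.modify genome [] (· ++ [c]) else d) d).keys
      = d.keys := by
  induction ll generalizing d with
  | nil => rfl
  | cons x t ih =>
    by_cases h : d.contains x = true
    · rw [List.foldl_cons, if_pos h, ih, PySem.Dict.keys_modify,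
        PySem.Dict.keys_insert_of_contains]
      simpa [PySem.Dict.contains_modify] using h
    · rw [List.foldl_cons, if_neg h, ih]

-- and appends c to the value at g once per occurrence of g in the group (if g is a key at all)
lemma pv_B_inner_getD (c : Int) (ll : List String) (d : PySem.Dict String (List Int)) (g : String) :
    (ll.foldl (fun d genome => if d.contains genome then d.modify genome [] (· ++ [c]) else d) d).getD g []
      = d.getD g [] ++ (if d.contains g then List.replicate (ll.count g) c else []) := by
  induction ll generalizing d with
  | nil => simp
  | cons x t ih =>
    by_cases hx : x = g
    · subst hx
      by_cases h : d.contains x = true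
      · rw [List.foldl_cons, if_pos h, ih, PySem.Dict.getD_modify_self,
          PySem.Dict.contains_modify]
        simp [List.replicate_succ, h]
      · rw [List.foldl_cons, if_neg h, ih]
        simp [h]
    · by_cases h : d.contains x = true
      · rw [List.foldl_cons, if_pos h, ih, PySem.Dict.getD_modify_of_ne _ _ _ (Ne.symm hx),
          PySem.Dict.contains_modify]
        simp [Ne.symm hx, hx]
      · rw [List.foldl_cons, if_neg h, ih]
        simp [hx]

-- B's outer loop over all groups: keys unchanged …
lemma pv_B_outer_keys (l : List (Int × List String)) (d : PySem.Dict String (List Int)) :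
    (l.foldl (fun d p =>
        (PySem.List.dedup p.2).foldl (fun d genome =>
          if d.contains genome then d.modify genome [] (· ++ [p.1]) else d) d) d).keys
      = d.keys := by
  induction l generalizing d with
  | nil => rfl
  | cons p t ih => rw [List.foldl_cons, ih, pv_B_inner_keys]

-- … and, for a genome g that is a key, the value at g collects exactly pvVal l g
lemma pv_B_outer_getD (l : List (Int × List String)) (d : PySem.Dict String (List Int)) (g : String) :
    (l.foldl (fun d p =>
        (PySem.List.dedup p.2).foldl (fun d genome =>
          if d.contains genome then d.modify genome [] (· ++ [p.1]) else d) d) d).getD g []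
      = d.getD g [] ++ (if d.contains g then pvVal l g else []) := by
  induction l generalizing d with
  | nil => simp [pvVal]
  | cons p t ih =>
    rw [List.foldl_cons, ih, pv_B_inner_getD]
    have hcont : ∀ d' : PySem.Dict String (List Int),
        ((PySem.List.dedup p.2).foldl (fun d genome =>
          if d.contains genome then d.modify genome [] (· ++ [p.1]) else d) d').contains g
          = d'.contains g := by
      intro d'
      rw [PySem.Dict.contains_eq_decide_mem_keys, PySem.Dict.contains_eq_decide_mem_keys,
        pv_B_inner_keys]
    rw [hcont]
    have hcount : (PySem.List.dedup p.2).count g = if g ∈ p.2 then 1 else 0 := by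
      rw [PySem.List.dedup]
      rw [(PySem.Set.nodup_ofList p.2).count]
      simp [PySem.Set.mem_ofList]
    by_cases h : d.contains g = true
    · rw [hcount]
      by_cases hm : g ∈ p.2 <;> simp [h, hm, pvVal]
    · simp [h]

-- a fold of inserts whose value depends only on the key (both initialisation loops have this shape)
lemma pv_foldl_insert_getD (v : String → List Int) (gs : List String)
    (d : PySem.Dict String (List Int)) (x : String) :
    (gs.foldl (fun d g => d.insert g (v g)) d).getD x []
      = if x ∈ gs then v x else d.getD x [] := by
  induction gs generalizing d with
  | nil => simp
  | cons g t ih =>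
    rw [List.foldl_cons, ih]
    by_cases hm : x ∈ t
    · simp [hm]
    · by_cases hx : x = g
      · subst hx; simp [hm, PySem.Dict.getD_insert_self]
      · simp [hm, hx, PySem.Dict.getD_insert _ _ _ _ _]

-- ===== VERDICT (by name: the statement is the Claim_ definition above) =====
theorem get_groups_per_genome_spec : Claim_equal_get_groups_per_genome := by
  intro all_groups genomes _ hpre
  unfold Spec_get_groups_per_genome get_groups_per_genome get_groups_per_genome_alt
  -- A's whole computation is a fold of 'insert genome (pvVal all_groups genome)'
  have hA : (genomes.foldl (fun d genome =>
      all_groups.foldl (fun d p =>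
          let group := (PySem.Dict.mk all_groups).getD p.1 []
          if genome ∈ group then d.modify genome [] (· ++ [p.1]) else d)
        (d.insert genome ([] : List Int)))
      (PySem.Dict.empty : PySem.Dict String (List Int)))
      = genomes.foldl (fun d g => d.insert g (pvVal all_groups g)) PySem.Dict.empty := by
    apply PySem.List.foldl_congr_mem
    intro d g _
    rw [pv_A_inner (fun p => (PySem.Dict.mk all_groups).getD p.1 []) g all_groups d []]
    rw [List.nil_append]
    congr 1
    unfold pvVal
    congr 1
    apply List.filter_congr
    intro p hp
    have hget : (PySem.Dict.mk all_groups).getD p.1 [] = p.2 := by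
      apply PySem.Dict.getD_of_mem_items (d := PySem.Dict.mk all_groups) (k := p.1) (v := p.2)
      · exact hp
      · exact hpre
    rw [hget]
  rw [hA]
  -- both sides are dicts with Nodup keys 'Set.ofList genomes'; compare items pointwise
  have hkeysC : (genomes.foldl (fun d g => d.insert g (pvVal all_groups g))
      (PySem.Dict.empty : PySem.Dict String (List Int))).keys = PySem.Set.ofList genomes := by
    rw [PySem.Dict.keys_foldl_insert genomes (fun _ g => pvVal all_groups g)]
    rw [PySem.Set.ofList_eq_foldl]; rfl
  have hkeysR : (genomes.foldl (fun d genome => d.insert genome ([] : List Int))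
      (PySem.Dict.empty : PySem.Dict String (List Int))).keys = PySem.Set.ofList genomes := by
    rw [PySem.Dict.keys_foldl_insert genomes (fun _ _ => ([] : List Int))]
    rw [PySem.Set.ofList_eq_foldl]; rfl
  have hnd : (PySem.Set.ofList genomes).Nodup := PySem.Set.nodup_ofList genomes
  rw [PySem.Dict.items_eq_map_keys _ (by rw [hkeysC]; exact hnd) ([] : List Int),
      PySem.Dict.items_eq_map_keys _ (by rw [pv_B_outer_keys, hkeysR]; exact hnd) ([] : List Int),
      hkeysC, pv_B_outer_keys, hkeysR]
  apply List.map_congr_left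
  intro g hg
  have hgm : g ∈ genomes := (PySem.Set.mem_ofList genomes g).mp hg
  have hC : (genomes.foldl (fun d g => d.insert g (pvVal all_groups g))
      (PySem.Dict.empty : PySem.Dict String (List Int))).getD g [] = pvVal all_groups g := by
    rw [pv_foldl_insert_getD]; simp [hgm]
  have hR0 : (genomes.foldl (fun d genome => d.insert genome ([] : List Int))
      (PySem.Dict.empty : PySem.Dict String (List Int))).getD g [] = [] := by
    rw [pv_foldl_insert_getD (fun _ => ([] : List Int))]; simp
  have hRc : (genomes.foldl (fun d genome => d.insert genome ([] : List Int))
      (PySem.Dict.empty : PySem.Dict String (List Int))).contains g = true := by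
    rw [PySem.Dict.contains_eq_decide_mem_keys, hkeysR]
    simpa [PySem.Set.mem_ofList]
  rw [hC, pv_B_outer_getD, hR0, hRc]
  simp
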